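-- pv_equiv track=rewrite | github.com/avigold/cansir | src/analysis/pps_calculator.py | is_in_callable_region
-- ===== SOURCE A (Python) =====
-- def is_in_callable_region(chrom: str, pos: int, regions: dict) -> bool:
--     """Check if a position falls within any callable region."""
--     chrom_regions = regions.get(str(chrom))
--     if not chrom_regions:
--         return False
--     # Binary search
--     import bisect
--     idx = bisect.bisect_right([r[0] for r in chrom_regions], pos) - 1
--     if idx < 0:
--         return False
--     return chrom_regions[idx][0] <= pos <= chrom_regions[idx][1]
-- ===== SOURCE B (Python) =====
-- def is_in_callable_region(chrom: str, pos: int, regions: dict) -> bool: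
--     """Check if a position falls within any callable region."""
--     rs = regions.get(str(chrom))
--     if not rs:
--         return False
--     # regions are sorted by start: the interval that can contain pos is the
--     # last one whose start is <= pos, i.e. the first such one seen from the right
--     for start, end in reversed(rs):
--         if start <= pos:
--             return pos <= end
--     return False
-- ===== Notes on version B (the rewrite author's own statement) =====
-- stated objective: simpler
-- what changed: B replaces A's build-a-starts-list-then-bisect with a single reverse linear scan that returns at the first interval whose start is <= pos; Pre_ restricts to region lists sorted by start (bisect's documented contract), the natural domain of callable-region tables.
-- outside the precondition, e.g. on is_in_callable_region('c', 7, {'c': [(0, 5), (10, 20), (6, 8)]}): A returns False, B returns True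
import Mathlib
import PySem

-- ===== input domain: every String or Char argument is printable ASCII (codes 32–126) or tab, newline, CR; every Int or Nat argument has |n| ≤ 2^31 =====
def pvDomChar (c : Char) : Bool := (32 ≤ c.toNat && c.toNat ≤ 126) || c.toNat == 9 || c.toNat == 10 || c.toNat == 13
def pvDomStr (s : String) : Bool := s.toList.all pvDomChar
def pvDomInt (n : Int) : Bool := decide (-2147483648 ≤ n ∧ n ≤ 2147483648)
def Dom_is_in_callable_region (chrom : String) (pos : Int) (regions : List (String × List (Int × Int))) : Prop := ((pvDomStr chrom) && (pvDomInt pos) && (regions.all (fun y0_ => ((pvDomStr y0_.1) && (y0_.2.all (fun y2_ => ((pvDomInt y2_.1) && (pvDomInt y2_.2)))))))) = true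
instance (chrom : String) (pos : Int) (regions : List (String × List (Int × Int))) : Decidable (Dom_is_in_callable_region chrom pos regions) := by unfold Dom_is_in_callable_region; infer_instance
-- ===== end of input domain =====

-- B replaces A's build-a-starts-list-then-bisect with a single reverse linear scan returning at the
-- first interval (from the right) whose start ≤ pos; objective: simpler.

-- ===== PORT A =====
def is_in_callable_region (chrom : String) (pos : Int) (regions : List (String × List (Int × Int))) : Bool :=
  match PySem.Dict.get? (PySem.Dict.mk regions) chrom with   -- regions.get(str(chrom)); str(chrom) = chrom
  | none => false
  | some chrom_regions =>
    if chrom_regions = [] then false   -- 'if not chrom_regions' (None handled above, empty list here)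
    else
      let idx : Int := (PySem.List.bisectRight (chrom_regions.map (fun r => r.1)) pos : Int) - 1
      if idx < 0 then false
      else
        let r := chrom_regions.getD idx.toNat (0, 0)   -- exact: 0 ≤ idx < length here
        decide (r.1 ≤ pos ∧ pos ≤ r.2)

-- ===== PORT B =====
-- 'for start, end in reversed(rs)' with its early return
def pvScanRev (l : List (Int × Int)) (pos : Int) : Bool :=
  match l with
  | [] => false
  | (s, e) :: t => if s ≤ pos then decide (pos ≤ e) else pvScanRev t pos

def is_in_callable_region_alt (chrom : String) (pos : Int) (regions : List (String × List (Int × Int))) : Bool :=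
  match PySem.Dict.get? (PySem.Dict.mk regions) chrom with
  | none => false
  | some rs =>
    if rs = [] then false   -- 'if not rs'
    else pvScanRev rs.reverse pos

-- ===== PRECONDITION & SPEC =====
-- Pre_ excludes inputs where the looked-up chromosome's region list has starts not in non-decreasing
-- order: bisect_right is documented only for sorted input, so A's value there is an accident of the
-- binary-search probe sequence (callable-region tables are sorted by start, the natural domain).
def Pre_is_in_callable_region (chrom : String) (_pos : Int) (regions : List (String × List (Int × Int))) : Prop :=
  List.Pairwise (fun r s : Int × Int => r.1 ≤ s.1)
    ((PySem.Dict.get? (PySem.Dict.mk regions) chrom).getD [])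
instance (chrom : String) (pos : Int) (regions : List (String × List (Int × Int))) : Decidable (Pre_is_in_callable_region chrom pos regions) := by unfold Pre_is_in_callable_region; infer_instance

def pvWitness_is_in_callable_region : String × Int × (List (String × List (Int × Int))) :=
  ("chr1", 15, [("chr1", [(0, 5), (10, 20)]), ("chr2", [(3, 4)])])

def Spec_is_in_callable_region (chrom : String) (pos : Int) (regions : List (String × List (Int × Int))) (out : Bool) : Prop := out = is_in_callable_region_alt chrom pos regions
instance (chrom : String) (pos : Int) (regions : List (String × List (Int × Int))) (out : Bool) : Decidable (Spec_is_in_callable_region chrom pos regions out) := by unfold Spec_is_in_callable_region; infer_instance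

-- ===== CLAIM (what is proved, stated in full; the proofs are below) =====
def Claim_equal_is_in_callable_region : Prop := ∀ (chrom : String) (pos : Int) (regions : List (String × List (Int × Int))), Dom_is_in_callable_region chrom pos regions → Pre_is_in_callable_region chrom pos regions → Spec_is_in_callable_region chrom pos regions (is_in_callable_region chrom pos regions)

-- ===== LEMMAS AND PROOFS =====

-- the reverse scan, characterised by the bisection index k (last start ≤ pos is at k-1)
theorem pv_scan_spec (pos : Int) (l : List (Int × Int)) (k : Nat)
    (hk : k ≤ l.length)
    (h1 : ∀ j (hj : j < l.length), j < k → (l[j]).1 ≤ pos)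
    (h2 : ∀ j (hj : j < l.length), k ≤ j → pos < (l[j]).1) :
    pvScanRev l.reverse pos = if 0 < k then decide (pos ≤ (l.getD (k - 1) (0, 0)).2) else false := by
  induction l using List.reverseRecOn generalizing k with
  | nil =>
    have : k = 0 := by simpa using hk
    simp [this, pvScanRev]
  | append_singleton t a ih =>
    have hn : (t ++ [a]).length = t.length + 1 := by simp
    by_cases hke : k = t.length + 1
    · -- last element has start ≤ pos
      have ha : a.1 ≤ pos := by
        have := h1 t.length (by omega) (by omega)
        simpa using this
      have hget : (t ++ [a]).getD (k - 1) (0, 0) = a := by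
        have : k - 1 = t.length := by omega
        rw [this, List.getD_eq_getElem _ _ (by simp)]
        simp [List.getElem_concat_length]
      obtain ⟨s, e⟩ := a
      simp only [List.reverse_append, List.reverse_singleton, List.singleton_append, pvScanRev]
      rw [if_pos ha, if_pos (by omega), hget]
    · -- pos < a.1 : the scan skips a and continues in t
      have hk' : k ≤ t.length := by omega
      have hlast : pos < a.1 := by
        have := h2 t.length (by omega) (by omega)
        simpa using this
      obtain ⟨s, e⟩ := a
      simp only [List.reverse_append, List.reverse_singleton, List.singleton_append, pvScanRev]
      rw [if_neg (by exact not_le.mpr hlast)]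
      have h1' : ∀ j (hj : j < t.length), j < k → (t[j]).1 ≤ pos := by
        intro j hj hjk
        have := h1 j (by omega) hjk
        rwa [List.getElem_append_left hj] at this
      have h2' : ∀ j (hj : j < t.length), k ≤ j → pos < (t[j]).1 := by
        intro j hj hjk
        have := h2 j (by omega) hjk
        rwa [List.getElem_append_left hj] at this
      rw [ih k hk' h1' h2']
      by_cases h0 : 0 < k
      · have hlt : k - 1 < t.length := by omega
        rw [if_pos h0, if_pos h0]
        rw [List.getD_eq_getElem _ _ hlt, List.getD_eq_getElem _ _ (by simp; omega),
            List.getElem_append_left hlt]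
      · simp [h0]

theorem pv_main (chrom : String) (pos : Int) (regions : List (String × List (Int × Int)))
    (hpre : Pre_is_in_callable_region chrom pos regions) :
    is_in_callable_region chrom pos regions = is_in_callable_region_alt chrom pos regions := by
  unfold is_in_callable_region is_in_callable_region_alt
  cases h : PySem.Dict.get? (PySem.Dict.mk regions) chrom with
  | none => rfl
  | some rs =>
    by_cases hnil : rs = []
    · simp [hnil]
    · simp only [if_neg hnil]
      have hsorted : List.Pairwise (fun r s : Int × Int => r.1 ≤ s.1) rs := by
        unfold Pre_is_in_callable_region at hpre
        rwa [h, Option.getD_some] at hpre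
      have hsm : List.Pairwise (fun a b : Int => a ≤ b) (rs.map (fun r => r.1)) := by
        rw [List.pairwise_map]; exact hsorted
      obtain ⟨hkle, hleft, hright⟩ := PySem.List.bisectRight_spec (rs.map (fun r => r.1)) pos hsm
      set k := PySem.List.bisectRight (rs.map (fun r => r.1)) pos with hkdef
      rw [List.length_map] at hkle
      have h1 : ∀ j (hj : j < rs.length), j < k → (rs[j]).1 ≤ pos := by
        intro j hj hjk
        have := hleft j (by simpa using hj) hjk
        simpa using this
      have h2 : ∀ j (hj : j < rs.length), k ≤ j → pos < (rs[j]).1 := by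
        intro j hj hjk
        have := hright j (by simpa using hj) hjk
        simpa using this
      rw [pv_scan_spec pos rs k hkle h1 h2]
      by_cases h0 : k = 0
      · simp [h0]
      · have hneg : ¬ ((k : Int) - 1 < 0) := by omega
        have htn : ((k : Int) - 1).toNat = k - 1 := by omega
        rw [if_neg hneg, if_pos (by omega), htn]
        have hlt : k - 1 < rs.length := by
          have hp : 0 < rs.length := List.length_pos_iff.mpr hnil
          omega
        have hfst : (rs.getD (k - 1) (0, 0)).1 ≤ pos := by
          rw [List.getD_eq_getElem _ _ hlt]
          exact h1 (k - 1) hlt (by omega)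
        simp only [decide_eq_decide]
        constructor
        · rintro ⟨_, hb⟩; exact hb
        · intro hb; exact ⟨hfst, hb⟩

-- ===== VERDICT (by name: the statement is the Claim_ definition above) =====
theorem is_in_callable_region_spec : Claim_equal_is_in_callable_region := by
  intro chrom pos regions _ hpre
  exact pv_main chrom pos regions hpre
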